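-- pv_equiv track=rewrite | github.com/yeonjungin/Algorithm_Studying_python | 2021/Study/week4/n1244.py | woman
-- ===== SOURCE A (Python) =====
-- def woman(array, num):
--     mid = num - 1
--     left = mid - 1
--     right = mid + 1
--     array[mid] = int(not array[mid])  # 현재 스위치 상태 바꾸기
--     while True:
--         if left >= 0 and right < len(array):  # 구간내에 있으면
--             if array[left] == array[right]:  # 대칭이면
--                 array[left] = int(not array[left])
--                 array[right] = int(not array[right])
--                 left-=1
--                 right+=1
--                 continue
--             # 대칭아니면?
--             return array
--         else:
--             return array
-- ===== SOURCE B (Python) =====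
-- def woman(array, num):
--     # Two-pass version: find the maximal symmetric radius first (read-only scan),
--     # then toggle all pairs.  Mutates and returns the same list, like A.
--     mid = num - 1
--     array[mid] = 0 if array[mid] else 1
--     d = 1
--     while mid - d >= 0 and mid + d < len(array) and array[mid - d] == array[mid + d]:
--         d += 1
--     r = d - 1
--     for d in range(1, r + 1):
--         array[mid - d] = 0 if array[mid - d] else 1
--         array[mid + d] = 0 if array[mid + d] else 1
--     return array
-- ===== Notes on version B (the rewrite author's own statement) =====
-- stated objective: alternative
-- what changed: A interleaves comparison and toggling in one outward while-loop; B first finds the maximal symmetric radius with a read-only outward scan and then toggles all pairs in a separate second pass.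
import Mathlib
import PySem

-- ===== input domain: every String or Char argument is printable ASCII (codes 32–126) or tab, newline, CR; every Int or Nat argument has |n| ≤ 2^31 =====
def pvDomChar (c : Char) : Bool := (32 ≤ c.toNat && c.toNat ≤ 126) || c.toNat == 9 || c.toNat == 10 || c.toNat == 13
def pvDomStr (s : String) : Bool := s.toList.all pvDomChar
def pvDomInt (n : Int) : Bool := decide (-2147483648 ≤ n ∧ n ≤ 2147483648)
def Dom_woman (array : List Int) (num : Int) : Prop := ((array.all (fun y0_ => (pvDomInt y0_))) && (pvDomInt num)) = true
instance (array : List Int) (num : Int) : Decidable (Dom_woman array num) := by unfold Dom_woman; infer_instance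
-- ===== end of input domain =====

-- B changes A's single interleaved toggle/compare loop into two passes (radius scan, then toggle); equivalence of the RETURN value is proved (both Pythons also mutate `array` identically in place).

-- int(not x)
def pvToggle (x : Int) : Int := if x = 0 then 1 else 0

-- ===== PORT A =====
-- A's while-loop: state (array, left, right), toggling as it compares.
def womanLoop (array : List Int) (left right : Int) : List Int :=
  if 0 ≤ left ∧ right < (array.length : Int) then
    if PySem.List.pyGetD array left 0 = PySem.List.pyGetD array right 0 then
      let a1 := PySem.List.pySetD array left (pvToggle (PySem.List.pyGetD array left 0))
      let a2 := PySem.List.pySetD a1 right (pvToggle (PySem.List.pyGetD a1 right 0))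
      womanLoop a2 (left - 1) (right + 1)
    else array
  else array
termination_by ((array.length : Int) - right).toNat
decreasing_by
  simp only [PySem.List.length_pySetD]
  omega

def woman (array : List Int) (num : Int) : List Int :=
  let mid := num - 1
  let arr0 := PySem.List.pySetD array mid (pvToggle (PySem.List.pyGetD array mid 0))
  womanLoop arr0 (mid - 1) (mid + 1)

-- ===== PORT B =====
-- B's read-only scan: first d ≥ start for which the symmetric pair fails, minus 1 (the maximal radius).
def womanScan (array : List Int) (mid d : Int) : Int :=
  if 0 ≤ mid - d ∧ mid + d < (array.length : Int) ∧
     PySem.List.pyGetD array (mid - d) 0 = PySem.List.pyGetD array (mid + d) 0 then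
    womanScan array mid (d + 1)
  else d - 1
termination_by ((array.length : Int) - (mid + d)).toNat
decreasing_by omega

-- B's second pass: toggle the pair at radius d.
def womanStep (mid : Int) (a : List Int) (d : Int) : List Int :=
  let a1 := PySem.List.pySetD a (mid - d) (pvToggle (PySem.List.pyGetD a (mid - d) 0))
  PySem.List.pySetD a1 (mid + d) (pvToggle (PySem.List.pyGetD a1 (mid + d) 0))

def woman_alt (array : List Int) (num : Int) : List Int :=
  let mid := num - 1
  let arr0 := PySem.List.pySetD array mid (pvToggle (PySem.List.pyGetD array mid 0))
  let r := womanScan arr0 mid 1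
  (PySem.List.pyRange 1 (r + 1) 1).foldl (womanStep mid) arr0

-- ===== PRECONDITION & SPEC =====
-- Pre_ excludes exactly the inputs where the first assignment array[num-1] raises IndexError (B raises there too).
def Pre_woman (array : List Int) (num : Int) : Prop :=
  -(array.length : Int) ≤ num - 1 ∧ num - 1 < (array.length : Int)
instance (array : List Int) (num : Int) : Decidable (Pre_woman array num) := by unfold Pre_woman; infer_instance
def pvWitness_woman : List Int × Int := ([0, 1, 0, 1, 0], 3)

def Spec_woman (array : List Int) (num : Int) (out : List Int) : Prop := out = woman_alt array num
instance (array : List Int) (num : Int) (out : List Int) : Decidable (Spec_woman array num out) := by unfold Spec_woman; infer_instance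

-- ===== CLAIM (what is proved, stated in full; the proofs are below) =====
def Claim_equal_woman : Prop := ∀ (array : List Int) (num : Int), Dom_woman array num → Pre_woman array num → Spec_woman array num (woman array num)

-- ===== LEMMAS AND PROOFS =====

-- reading elsewhere than a nonneg in-range write position is unchanged
theorem pvGet_set_ne (xs : List Int) (i j v : Int) (hi0 : 0 ≤ i) (hil : i < (xs.length : Int))
    (hj0 : 0 ≤ j) (hne : j ≠ i) :
    PySem.List.pyGetD (PySem.List.pySetD xs i v) j 0 = PySem.List.pyGetD xs j 0 := by
  obtain ⟨m, rfl⟩ := Int.eq_ofNat_of_zero_le hi0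
  obtain ⟨n, rfl⟩ := Int.eq_ofNat_of_zero_le hj0
  have hmn : n ≠ m := by omega
  simp [PySem.List.pySetD_natCast, PySem.List.pyGetD_natCast, List.getD_eq_getElem?_getD,
    List.getElem?_set_ne (by omega : m ≠ n)]

theorem pvScan_ge (array : List Int) (mid d : Int) : d - 1 ≤ womanScan array mid d := by
  fun_induction womanScan array mid d <;> omega

-- womanScan only reads positions mid±e for e ≥ d, all nonneg in-range
theorem pvScan_congr (a b : List Int) (mid d : Int) (hd : 0 ≤ d) (hlen : a.length = b.length)
    (hagree : ∀ j : Int, 0 ≤ j → (j ≤ mid - d ∨ mid + d ≤ j) →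
      PySem.List.pyGetD a j 0 = PySem.List.pyGetD b j 0) :
    womanScan a mid d = womanScan b mid d := by
  fun_induction womanScan a mid d with
  | case1 d hcond ih =>
    conv_rhs => rw [womanScan]
    have hl : 0 ≤ mid - d := hcond.1
    have hr : mid + d < (b.length : Int) := by have := hcond.2.1; omega
    have e1 : PySem.List.pyGetD a (mid - d) 0 = PySem.List.pyGetD b (mid - d) 0 :=
      hagree _ hl (Or.inl le_rfl)
    have e2 : PySem.List.pyGetD a (mid + d) 0 = PySem.List.pyGetD b (mid + d) 0 :=
      hagree _ (by omega) (Or.inr le_rfl)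
    rw [if_pos ⟨hl, hr, by rw [← e1, ← e2]; exact hcond.2.2⟩]
    exact ih (by omega) (fun j hj hside => hagree j hj (by omega))
  | case2 d hcond =>
    conv_rhs => rw [womanScan]
    rw [if_neg]
    intro ⟨h1, h2, h3⟩
    exact hcond ⟨h1, by omega, by
      rw [hagree _ h1 (Or.inl le_rfl), hagree _ (by omega) (Or.inr le_rfl)]; exact h3⟩

theorem pvMainAux (n : Nat) : ∀ (arr : List Int) (mid d : Int), 1 ≤ d →
    ((arr.length : Int) - (mid + d)).toNat ≤ n →
    womanLoop arr (mid - d) (mid + d) =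
      (PySem.List.pyRange d (womanScan arr mid d + 1) 1).foldl (womanStep mid) arr := by
  induction n with
  | zero =>
    intro arr mid d hd hb
    rw [womanLoop, womanScan]
    rw [if_neg (by omega), if_neg (by rintro ⟨h1, h2, h3⟩; omega)]
    rw [PySem.List.pyRange_one_eq_nil (by omega)]
    rfl
  | succ n ih =>
    intro arr mid d hd hb
    rw [womanLoop, womanScan]
    by_cases hrange : 0 ≤ mid - d ∧ mid + d < (arr.length : Int)
    · rw [if_pos hrange]
      by_cases heq : PySem.List.pyGetD arr (mid - d) 0 = PySem.List.pyGetD arr (mid + d) 0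
      · rw [if_pos heq, if_pos ⟨hrange.1, hrange.2, heq⟩]
        set a2 := PySem.List.pySetD (PySem.List.pySetD arr (mid - d) (pvToggle (PySem.List.pyGetD arr (mid - d) 0))) (mid + d)
          (pvToggle (PySem.List.pyGetD (PySem.List.pySetD arr (mid - d) (pvToggle (PySem.List.pyGetD arr (mid - d) 0))) (mid + d) 0)) with ha2
        have hlen : a2.length = arr.length := by
          rw [ha2]; simp [PySem.List.length_pySetD]
        have hstep : a2 = womanStep mid arr d := rfl
        have hagree : ∀ j : Int, 0 ≤ j → (j ≤ mid - (d + 1) ∨ mid + (d + 1) ≤ j) →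
            PySem.List.pyGetD a2 j 0 = PySem.List.pyGetD arr j 0 := by
          intro j hj hside
          rw [ha2]
          rw [pvGet_set_ne _ _ _ _ (by omega) (by simp [PySem.List.length_pySetD]; omega) hj (by omega)]
          rw [pvGet_set_ne _ _ _ _ hrange.1 (by omega) hj (by omega)]
        have hscan : womanScan a2 mid (d + 1) = womanScan arr mid (d + 1) :=
          pvScan_congr a2 arr mid (d + 1) (by omega) hlen hagree
        have hge : d ≤ womanScan arr mid (d + 1) := by
          have := pvScan_ge arr mid (d + 1); omega
        have e1 : mid - d - 1 = mid - (d + 1) := by ring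
        have e2 : mid + d + 1 = mid + (d + 1) := by ring
        rw [e1, e2, ih a2 mid (d + 1) (by omega) (by rw [hlen]; omega), hscan]
        rw [PySem.List.pyRange_one_cons (by omega : d < womanScan arr mid (d + 1) + 1)]
        rw [List.foldl_cons, ← hstep]
      · rw [if_neg heq, if_neg (by rintro ⟨h1, h2, h3⟩; exact heq h3)]
        rw [PySem.List.pyRange_one_eq_nil (by omega)]
        rfl
    · rw [if_neg hrange, if_neg (by rintro ⟨h1, h2, h3⟩; exact hrange ⟨h1, by omega⟩)]
      rw [PySem.List.pyRange_one_eq_nil (by omega)]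
      rfl

theorem pvMain (arr : List Int) (mid d : Int) (hd : 1 ≤ d) :
    womanLoop arr (mid - d) (mid + d) =
      (PySem.List.pyRange d (womanScan arr mid d + 1) 1).foldl (womanStep mid) arr := by
  exact pvMainAux ((arr.length : Int) - (mid + d)).toNat arr mid d hd le_rfl

-- ===== VERDICT (by name: the statement is the Claim_ definition above) =====
theorem woman_spec : Claim_equal_woman := by
  intro array num _ _
  unfold Spec_woman woman woman_alt
  have := pvMain (PySem.List.pySetD array (num - 1) (pvToggle (PySem.List.pyGetD array (num - 1) 0))) (num - 1) 1 le_rfl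
  simpa using this
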